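-- pv_equiv track=rewrite | github.com/sergiocordobam/MISION-TIC | RETO4/RETO4-CUENTO.py | eliminar_y_minuscula
-- ===== SOURCE A (Python) =====
-- def eliminar_y_minuscula(lista_texto):
--     caracteres = ['-','¿','?','.',',','¡','!',':','"','–']
--     lista_texto = " ".join(lista_texto)
--     for palabra in lista_texto:
--         lista_texto = lista_texto.lower()
--
--     for caracter in caracteres:
--         lista_texto = lista_texto.replace(caracter,"")
--     lista_texto = lista_texto.split(" ")
--     return lista_texto
-- ===== SOURCE B (Python) =====
-- def eliminar_y_minuscula(lista_texto):
--     # Single-pass state machine: builds the word list directly, no join/replace/split.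
--     drop = set('-\u00bf?.,\u00a1!:"\u2013')
--     words = ['']
--     first = True
--     for s in lista_texto:
--         if not first:
--             words.append('')  # the joining space is a split boundary
--         first = False
--         for ch in s:
--             if ch == ' ':
--                 words.append('')
--             elif ch not in drop:
--                 words[-1] += ch.lower()
--     return words
-- ===== Notes on version B (the rewrite author's own statement) =====
-- stated objective: faster
-- what changed: A joins, re-lowercases the whole joined string once per character, runs ten full-string .replace scans and finally splits; B never builds the joined string at all: a single character-level state machine walks the input once, appending to the current word or opening a new one, with one membership set for the deleted characters.
import Mathlib
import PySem

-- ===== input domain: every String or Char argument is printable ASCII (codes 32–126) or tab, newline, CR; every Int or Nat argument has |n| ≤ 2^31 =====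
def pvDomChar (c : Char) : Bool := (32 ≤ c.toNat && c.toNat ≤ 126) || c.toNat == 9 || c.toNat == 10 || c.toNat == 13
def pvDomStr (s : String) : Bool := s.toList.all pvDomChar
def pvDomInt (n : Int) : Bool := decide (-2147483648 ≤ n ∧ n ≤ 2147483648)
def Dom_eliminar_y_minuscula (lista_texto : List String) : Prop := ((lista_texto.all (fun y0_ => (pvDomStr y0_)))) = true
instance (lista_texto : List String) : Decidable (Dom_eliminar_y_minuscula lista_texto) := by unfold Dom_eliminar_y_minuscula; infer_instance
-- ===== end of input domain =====

-- B replaces A's join + per-character repeated .lower() passes + ten .replace scans + split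
-- by one character-level state machine that builds the word list directly (return value only).

-- ===== PORT A =====
def eliminar_y_minuscula (lista_texto : List String) : List String :=
  let caracteres : List String := ["-", "¿", "?", ".", ",", "¡", "!", ":", "\"", "–"]
  let t0 := PySem.Str.join " " lista_texto
  -- 'for palabra in lista_texto: lista_texto = lista_texto.lower()' iterates over the
  -- ORIGINAL joined string, re-lowercasing once per character
  let t1 := t0.toList.foldl (fun acc _ => PySem.Str.lower acc) t0
  let t2 := caracteres.foldl (fun acc c => PySem.Str.replace acc c "") t1
  (PySem.Str.split? t2 " ").getD []   -- sep " " is nonempty, so split? is always `some`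

-- ===== PORT B =====
-- the deletion set drop = set('-¿?.,¡!:"–')
def pvDrop : List Char := ['-', '¿', '?', '.', ',', '¡', '!', ':', '"', '–']

-- words[-1] += ch  (the word list is always nonempty)
def pvAddLast : List String → Char → List String
  | [], c => [String.ofList [c]]
  | [w], c => [String.ofList (w.toList ++ [c])]
  | w :: ws, c => w :: pvAddLast ws c

-- the body of B's inner loop over the characters of one string
def pvStep (ws : List String) (ch : Char) : List String :=
  if ch = ' ' then ws ++ [""]
  else if pvDrop.contains ch then ws
  else pvAddLast ws (PySem.Chars.lowerChar ch)

def eliminar_y_minuscula_alt (lista_texto : List String) : List String :=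
  (lista_texto.foldl
    (fun st s =>
      let ws := if st.2 then st.1 else st.1 ++ [""]   -- 'if not first: words.append('')'
      (s.toList.foldl pvStep ws, false))
    (([""] : List String), true)).1

-- ===== PRECONDITION & SPEC =====
def Spec_eliminar_y_minuscula (lista_texto : List String) (out : List String) : Prop := out = eliminar_y_minuscula_alt lista_texto
instance (lista_texto : List String) (out : List String) : Decidable (Spec_eliminar_y_minuscula lista_texto out) := by unfold Spec_eliminar_y_minuscula; infer_instance

-- ===== CLAIM (what is proved, stated in full; the proofs are below) =====
def Claim_equal_eliminar_y_minuscula : Prop := ∀ (lista_texto : List String), Dom_eliminar_y_minuscula lista_texto → Spec_eliminar_y_minuscula lista_texto (eliminar_y_minuscula lista_texto)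

-- ===== LEMMAS AND PROOFS =====

-- ---- proof-side helpers ----

-- split on a single space, recursively
def pvSpl : List Char → List (List Char)
  | [] => [[]]
  | c :: t =>
      if c = ' ' then [] :: pvSpl t
      else match pvSpl t with
        | [] => [[c]]
        | x :: xs => (c :: x) :: xs

-- the cleaned character stream A ends up with
def pvClean (cs : List Char) : List Char :=
  (PySem.Chars.lower cs).filter (fun x => !(pvDrop.contains x))

lemma pvSpl_ne_nil (cs : List Char) : pvSpl cs ≠ [] := by
  cases cs with
  | nil => simp [pvSpl]
  | cons c t =>
    simp only [pvSpl]
    split_ifs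
    · simp
    · cases h : pvSpl t <;> simp

-- ---- character facts ----

lemma pv_lowerChar_eq_or (c : Char) :
    PySem.Chars.lowerChar c = c ∨ (65 ≤ c.toNat ∧ c.toNat ≤ 90 ∧ (PySem.Chars.lowerChar c).toNat = c.toNat + 32) := by
  simp only [PySem.Chars.lowerChar, PySem.Chars.isupper]
  split_ifs with h1
  · right
    simp only [Bool.and_eq_true, decide_eq_true_eq, Char.le_def, UInt32.le_iff_toNat_le] at h1
    have hA : ('A').val.toNat = 65 := by decide
    have hZ : ('Z').val.toNat = 90 := by decide
    have hv : 65 ≤ c.toNat ∧ c.toNat ≤ 90 := ⟨hA ▸ h1.1, hZ ▸ h1.2⟩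
    have hval : (c.toNat + 32).isValidChar := by left; omega
    have ht : (Char.ofNat (c.toNat + 32)).val.toNat = c.toNat + 32 := by
      show (Char.ofNat (c.toNat + 32)).toNat = c.toNat + 32
      rw [Char.toNat_ofNat, if_pos hval]
    exact ⟨hv.1, hv.2, ht⟩
  · left; rfl

lemma pv_toNat_of_mem_drop {c : Char} (h : c ∈ pvDrop) :
    c.toNat = 45 ∨ c.toNat = 191 ∨ c.toNat = 63 ∨ c.toNat = 46 ∨ c.toNat = 44 ∨
    c.toNat = 161 ∨ c.toNat = 33 ∨ c.toNat = 58 ∨ c.toNat = 34 ∨ c.toNat = 8211 := by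
  simp only [pvDrop, List.mem_cons, List.not_mem_nil, or_false] at h
  rcases h with h|h|h|h|h|h|h|h|h|h <;> subst h <;> decide

lemma pv_drop_lowerChar (c : Char) : (PySem.Chars.lowerChar c ∈ pvDrop) ↔ (c ∈ pvDrop) := by
  rcases pv_lowerChar_eq_or c with h | ⟨h1, h2, h3⟩
  · rw [h]
  · constructor
    · intro hm
      have := pv_toNat_of_mem_drop hm
      omega
    · intro hm
      have := pv_toNat_of_mem_drop hm
      omega

lemma pv_lowerChar_space_iff (c : Char) : PySem.Chars.lowerChar c = ' ' ↔ c = ' ' := by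
  rcases pv_lowerChar_eq_or c with h | ⟨h1, h2, h3⟩
  · rw [h]
  · constructor
    · intro hc
      have ht := congrArg Char.toNat hc
      have h32 : (' ').toNat = 32 := by decide
      omega
    · intro hc
      subst hc
      have h32 : (' ').toNat = 32 := by decide
      omega

-- ---- B's inner machine computes pvSpl ∘ pvClean ----

lemma pv_addLast_append (ws : List String) (w : String) (c : Char) :
    pvAddLast (ws ++ [w]) c = ws ++ [String.ofList (w.toList ++ [c])] := by
  induction ws with
  | nil => rfl
  | cons x t ih =>
    cases t with
    | nil => simp [pvAddLast]
    | cons y u => simpa [pvAddLast] using ih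

-- stitch w onto the head of the split of cs
def pvGlue (w : List Char) (cs : List Char) : List String :=
  match pvSpl cs with
  | [] => []
  | x :: xs => String.ofList (w ++ x) :: xs.map String.ofList

lemma pv_machine (cs : List Char) : ∀ (ws : List String) (w : List Char),
    cs.foldl pvStep (ws ++ [String.ofList w]) = ws ++ pvGlue w (pvClean cs) := by
  induction cs with
  | nil =>
    intro ws w
    simp [pvClean, PySem.Chars.lower, pvGlue, pvSpl]
  | cons c t ih =>
    intro ws w
    rw [List.foldl_cons]
    have hspace_mem : ¬ (' ' ∈ pvDrop) := by decide
    have hlsp : PySem.Chars.lowerChar ' ' = ' ' := by decide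
    by_cases hsp : c = ' '
    · subst hsp
      have hstep : pvStep (ws ++ [String.ofList w]) ' ' = (ws ++ [String.ofList w]) ++ [String.ofList []] := by
        simp [pvStep]
      rw [hstep, ih (ws ++ [String.ofList w]) []]
      have hc : pvClean (' ' :: t) = ' ' :: pvClean t := by
        simp [pvClean, PySem.Chars.lower, hlsp, hspace_mem]
      rw [hc]
      have : pvGlue w (' ' :: pvClean t) = String.ofList w :: pvGlue [] (pvClean t) := by
        simp only [pvGlue, pvSpl]
        cases h : pvSpl (pvClean t) with
        | nil => exact absurd h (pvSpl_ne_nil _)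
        | cons x xs => simp
      rw [this, List.append_assoc]
      rfl
    · by_cases hdr : c ∈ pvDrop
      · have hstep : pvStep (ws ++ [String.ofList w]) c = ws ++ [String.ofList w] := by
          simp [pvStep, hsp, hdr]
        rw [hstep, ih ws w]
        have hc : pvClean (c :: t) = pvClean t := by
          simp [pvClean, PySem.Chars.lower, (pv_drop_lowerChar c).mpr hdr]
        rw [hc]
      · have hstep : pvStep (ws ++ [String.ofList w]) c
            = ws ++ [String.ofList (w ++ [PySem.Chars.lowerChar c])] := by
          simp only [pvStep, hsp, if_false, List.contains_eq_mem, hdr, decide_false,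
            Bool.false_eq_true, if_false]
          rw [pv_addLast_append]
          simp
        rw [hstep, ih ws (w ++ [PySem.Chars.lowerChar c])]
        have hldr : ¬ (PySem.Chars.lowerChar c ∈ pvDrop) := fun h => hdr ((pv_drop_lowerChar c).mp h)
        have hc : pvClean (c :: t) = PySem.Chars.lowerChar c :: pvClean t := by
          simp [pvClean, PySem.Chars.lower, hldr]
        rw [hc]
        have hlcsp : ¬ (PySem.Chars.lowerChar c = ' ') := fun h => hsp ((pv_lowerChar_space_iff c).mp h)
        have : pvGlue w (PySem.Chars.lowerChar c :: pvClean t)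
            = pvGlue (w ++ [PySem.Chars.lowerChar c]) (pvClean t) := by
          simp only [pvGlue, pvSpl, hlcsp, if_false]
          cases h : pvSpl (pvClean t) with
          | nil => exact absurd h (pvSpl_ne_nil _)
          | cons x xs => simp
        rw [this]

-- ---- B's outer loop processes the characters of ' '.join(lista) ----

lemma pv_outer_chars (rest : List String) : ∀ (ws : List String),
    (rest.foldl
      (fun st s =>
        let ws' := if st.2 then st.1 else st.1 ++ [""]
        (s.toList.foldl pvStep ws', false))
      (ws, false)).1
    = (rest.flatMap (fun s => ' ' :: s.toList)).foldl pvStep ws := by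
  induction rest with
  | nil => intro ws; rfl
  | cons s t ih =>
    intro ws
    rw [List.foldl_cons, List.flatMap_cons]
    have hsp : pvStep ws ' ' = ws ++ [""] := by simp [pvStep]
    simp only [List.foldl_cons, List.foldl_append, hsp]
    exact ih _

lemma pv_join_cons (s : String) (rest : List String) :
    PySem.Chars.join [' '] ((s :: rest).map String.toList)
      = s.toList ++ rest.flatMap (fun t => ' ' :: t.toList) := by
  induction rest generalizing s with
  | nil => simp [PySem.Chars.join, List.intercalate]
  | cons y u ihr =>
    rw [List.map_cons, List.map_cons, PySem.Chars.join_cons_cons]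
    have := ihr y
    rw [List.map_cons] at this
    rw [this]
    simp

lemma pv_alt_eq_glue (lista_texto : List String) :
    eliminar_y_minuscula_alt lista_texto
      = pvGlue [] (pvClean (PySem.Chars.join [' '] (lista_texto.map String.toList))) := by
  cases lista_texto with
  | nil =>
    simp [eliminar_y_minuscula_alt, PySem.Chars.join, pvClean, PySem.Chars.lower, pvGlue]
    rfl
  | cons s rest =>
    have h1 : eliminar_y_minuscula_alt (s :: rest)
        = (rest.foldl
            (fun st s =>
              let ws' := if st.2 then st.1 else st.1 ++ [""]
              (s.toList.foldl pvStep ws', false))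
            (s.toList.foldl pvStep [""], false)).1 := by
      rfl
    rw [h1, pv_outer_chars, ← List.foldl_append]
    rw [pv_join_cons]
    have : ([""] : List String) = [] ++ [String.ofList []] := by rfl
    rw [this, pv_machine]
    simp

-- ---- A's pipeline yields the same cleaned string, then splits it ----

-- lowering is idempotent (PySem's upper-case test is the ASCII range A–Z)
lemma pv_lowerChar_idem (c : Char) :
    PySem.Chars.lowerChar (PySem.Chars.lowerChar c) = PySem.Chars.lowerChar c := by
  rcases pv_lowerChar_eq_or c with h | ⟨h1, h2, h3⟩
  · rw [h, h]  -- may need fix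
  · rcases pv_lowerChar_eq_or (PySem.Chars.lowerChar c) with h' | ⟨h1', h2', h3'⟩
    · exact h'
    · omega

lemma pv_lower_idem (cs : List Char) :
    PySem.Chars.lower (PySem.Chars.lower cs) = PySem.Chars.lower cs := by
  simp [PySem.Chars.lower, List.map_map, Function.comp_def, pv_lowerChar_idem]

lemma pv_foldl_lower_fix (l : List Char) (cs : List Char) :
    l.foldl (fun a _ => PySem.Chars.lower a) (PySem.Chars.lower cs) = PySem.Chars.lower cs := by
  induction l with
  | nil => rfl
  | cons x t ih => simp only [List.foldl_cons, pv_lower_idem, ih]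

-- the chars-level shape of A's re-lowercasing loop: lowering once per character is lowering once
lemma pv_foldl_lower_self (cs : List Char) :
    cs.foldl (fun a _ => PySem.Chars.lower a) cs = PySem.Chars.lower cs := by
  cases cs with
  | nil => rfl
  | cons x t =>
    rw [List.foldl_cons]
    exact pv_foldl_lower_fix t (x :: t)

lemma pv_foldl_lower_toList (l : List Char) (s : String) :
    (l.foldl (fun acc _ => PySem.Str.lower acc) s).toList
      = l.foldl (fun a _ => PySem.Chars.lower a) s.toList := by
  induction l generalizing s with
  | nil => rfl
  | cons x t ih => simp only [List.foldl_cons, ih, PySem.Str.toList_lower]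

-- str.replace(c, "") with a one-character pattern deletes exactly the occurrences of c
lemma pv_replace_go_single (c : Char) (l : List Char) :
    ∀ (fuel : Nat) (acc : List Char), l.length ≤ fuel →
      PySem.Chars.replace.go [c] [] fuel l acc = acc.reverse ++ l.filter (fun x => x ≠ c) := by
  induction l with
  | nil =>
    intro fuel acc _
    cases fuel <;> simp [PySem.Chars.replace.go]
  | cons x t ih =>
    intro fuel acc hle
    cases fuel with
    | zero => simp at hle
    | succ f =>
      rw [PySem.Chars.replace.go]
      by_cases h : x = c
      · subst h
        have hpre : List.isPrefixOf [x] (x :: t) = true := by simp [List.isPrefixOf]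
        simp only [hpre, if_pos]
        simp only [List.length_nil, List.length_cons] at *
        rw [show List.drop (0 + 1) (x :: t) = t from by simp]
        rw [show List.reverse ([] : List Char) ++ acc = acc from by simp]
        rw [ih f acc (by omega)]
        simp
      · have hpre : List.isPrefixOf [c] (x :: t) = false := by
          simp [List.isPrefixOf]
          exact fun hc => absurd hc.symm h
        simp only [hpre, Bool.false_eq_true, if_false]
        simp only [List.length_cons] at hle
        rw [ih f (x :: acc) (by omega)]
        simp [h]

lemma pv_replace_single (cs : List Char) (c : Char) :
    PySem.Chars.replace cs [c] [] = cs.filter (fun x => x ≠ c) := by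
  rw [PySem.Chars.replace]
  simp only [List.isEmpty_cons, Bool.false_eq_true, if_false]
  rw [pv_replace_go_single c cs cs.length [] (le_refl _)]
  simp

-- folding single-character deletions over the table is one filtering pass
lemma pv_foldl_replace_filter (tabla : List Char) (cs : List Char) :
    tabla.foldl (fun acc c => PySem.Chars.replace acc [c] []) cs
      = cs.filter (fun x => !(tabla.contains x)) := by
  induction tabla generalizing cs with
  | nil => simp
  | cons c t ih =>
    rw [List.foldl_cons, pv_replace_single, ih, List.filter_filter]
    refine List.filter_congr ?_
    intro a _
    by_cases h : a = c <;> simp [h]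

lemma pv_foldl_replace_toList (cars : List String) (s : String) :
    (cars.foldl (fun acc c => PySem.Str.replace acc c "") s).toList
      = cars.foldl (fun acc c => PySem.Chars.replace acc c.toList []) s.toList := by
  induction cars generalizing s with
  | nil => rfl
  | cons x t ih => simp only [List.foldl_cons, ih, PySem.Str.toList_replace]; rfl

-- the single string A has built is the cleaned join
lemma pv_A_string (l : List String) :
    ((["-", "¿", "?", ".", ",", "¡", "!", ":", "\"", "–"] : List String).foldl (fun acc c => PySem.Str.replace acc c "")
        ((PySem.Str.join " " l).toList.foldl (fun acc _ => PySem.Str.lower acc) (PySem.Str.join " " l))).toList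
      = pvClean (PySem.Chars.join [' '] (l.map String.toList)) := by
  set s0 := PySem.Str.join " " l with hs0
  rw [pv_foldl_replace_toList, pv_foldl_lower_toList, pv_foldl_lower_self]
  have hcars : (["-", "¿", "?", ".", ",", "¡", "!", ":", "\"", "–"] : List String).foldl
      (fun acc c => PySem.Chars.replace acc c.toList []) (PySem.Chars.lower s0.toList)
      = pvDrop.foldl (fun acc ch => PySem.Chars.replace acc [ch] []) (PySem.Chars.lower s0.toList) := by
    rfl
  rw [hcars, pv_foldl_replace_filter]
  have : s0.toList = PySem.Chars.join [' '] (l.map String.toList) := by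
    rw [hs0, PySem.Str.join]
    simp
  rw [this]
  rfl

-- splitOn with the single-space separator is pvSpl
lemma pv_splitOn_go (fuel : Nat) : ∀ (l cur : List Char) (acc : List (List Char)), l.length < fuel →
    PySem.Chars.splitOn.go [' '] fuel l cur acc
      = acc.reverse ++ (match pvSpl l with
          | [] => []
          | x :: xs => (cur.reverse ++ x) :: xs) := by
  induction fuel with
  | zero => intro l cur acc h; omega
  | succ f ih =>
    intro l cur acc h
    cases l with
    | nil =>
      simp [PySem.Chars.splitOn.go, pvSpl]
    | cons c t =>
      rw [PySem.Chars.splitOn.go]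
      by_cases hc : c = ' '
      · subst hc
        have hpre : List.isPrefixOf [' '] (' ' :: t) = true := by simp [List.isPrefixOf]
        simp only [hpre, if_pos]
        have hd : List.drop ([' '] : List Char).length (' ' :: t) = t := by simp
        rw [hd, ih t [] (cur.reverse :: acc) (by simp at h; omega)]
        simp only [pvSpl]
        cases hx : pvSpl t with
        | nil => exact absurd hx (pvSpl_ne_nil _)
        | cons x xs => simp
      · have hpre : List.isPrefixOf ([' '] : List Char) (c :: t) = false := by
          simp [List.isPrefixOf]
          exact fun hh => absurd hh.symm hc
        simp only [hpre, Bool.false_eq_true, if_false]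
        rw [ih t (c :: cur) acc (by simp at h; omega)]
        simp only [pvSpl, hc, if_false]
        cases hx : pvSpl t with
        | nil => exact absurd hx (pvSpl_ne_nil _)
        | cons x xs => simp

lemma pv_splitOn_spl (cs : List Char) :
    PySem.Chars.splitOn cs [' '] = pvSpl cs := by
  rw [PySem.Chars.splitOn, pv_splitOn_go (cs.length + 1) cs [] [] (by omega)]
  cases hx : pvSpl cs with
  | nil => exact absurd hx (pvSpl_ne_nil _)
  | cons x xs => simp

-- ===== VERDICT (by name: the statement is the Claim_ definition above) =====
theorem eliminar_y_minuscula_spec : Claim_equal_eliminar_y_minuscula := by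
  intro lista_texto _
  unfold Spec_eliminar_y_minuscula
  rw [pv_alt_eq_glue]
  show (PySem.Str.split? _ " ").getD [] = _
  rw [PySem.Str.split?]
  have hsep : (" " : String).toList = [' '] := by decide
  rw [PySem.Chars.split?]
  simp only [hsep]
  rw [if_neg (by simp)]
  rw [pv_A_string, pv_splitOn_spl]
  simp only [Option.map_some, Option.getD_some]
  simp only [pvGlue]
  cases hx : pvSpl (pvClean (PySem.Chars.join [' '] (lista_texto.map String.toList))) with
  | nil => exact absurd hx (pvSpl_ne_nil _)
  | cons x xs => simp
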